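-- pv_equiv track=rewrite | github.com/swm16-wREck/Oddiya-Backend | fix-yaml.py | merge_app_sections
-- ===== SOURCE A (Python) =====
-- def merge_app_sections(profile_content):
--     """Merge multiple app sections in a profile"""
--     lines = profile_content.split('\n')
--     result = []
--     app_sections = []
--     current_app = []
--     in_app = False
--     indent_level = 0
--
--     i = 0
--     while i < len(lines):
--         line = lines[i]
--
--         # Check if this is an app: line at root level
--         if line.strip() == 'app:' and (not line.startswith(' ') or line[:4] == 'app:'):
--             if in_app and current_app:
--                 # Save previous app section
--                 app_sections.append('\n'.join(current_app[1:]))  # Skip the app: line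
--             in_app = True
--             current_app = [line]
--             indent_level = len(line) - len(line.lstrip())
--         elif in_app:
--             # Check if we're still in the app section
--             if line.strip() and not line.startswith(' ' * (indent_level + 1)) and line.strip() != '':
--                 # We've left the app section
--                 if current_app:
--                     app_sections.append('\n'.join(current_app[1:]))  # Skip the app: line
--                 in_app = False
--                 current_app = []
--                 result.append(line)
--             else:
--                 current_app.append(line)
--         else:
--             result.append(line)
--
--         i += 1
--
--     # Handle last app section
--     if in_app and current_app:
--         app_sections.append('\n'.join(current_app[1:]))
--
--     # If we have app sections, merge them and add at the end
--     if app_sections: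
--         merged_app = 'app:\n' + '\n'.join(app_sections)
--         result.append(merged_app)
--
--     return '\n'.join(result)
-- ===== SOURCE B (Python) =====
-- def merge_app_sections(profile_content):
--     """Merge multiple app sections in a profile (block-consuming rewrite)."""
--     lines = profile_content.split('\n')
--     n = len(lines)
--     result = []
--     app_sections = []
--     i = 0
--     while i < n:
--         line = lines[i]
--         if line.strip() == 'app:' and not line.startswith(' '):
--             indent = len(line) - len(line.lstrip())
--             body = ' ' * (indent + 1)
--             j = i + 1
--             block = []
--             while j < n:
--                 nxt = lines[j]
--                 if nxt.strip() == 'app:' and not nxt.startswith(' '):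
--                     break
--                 if nxt.strip() and not nxt.startswith(body):
--                     break
--                 block.append(nxt)
--                 j += 1
--             app_sections.append('\n'.join(block))
--             i = j
--         else:
--             result.append(line)
--             i += 1
--     if app_sections:
--         result.append('app:\n' + '\n'.join(app_sections))
--     return '\n'.join(result)
-- ===== Notes on version B (the rewrite author's own statement) =====
-- stated objective: simpler
-- what changed: Replaced A's in_app/current_app/indent_level flag-machinery fold with an index-driven loop that, on each root-level app header line, consumes the whole indented block with an inner scan and appends its join directly to the collected sections.
import Mathlib
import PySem

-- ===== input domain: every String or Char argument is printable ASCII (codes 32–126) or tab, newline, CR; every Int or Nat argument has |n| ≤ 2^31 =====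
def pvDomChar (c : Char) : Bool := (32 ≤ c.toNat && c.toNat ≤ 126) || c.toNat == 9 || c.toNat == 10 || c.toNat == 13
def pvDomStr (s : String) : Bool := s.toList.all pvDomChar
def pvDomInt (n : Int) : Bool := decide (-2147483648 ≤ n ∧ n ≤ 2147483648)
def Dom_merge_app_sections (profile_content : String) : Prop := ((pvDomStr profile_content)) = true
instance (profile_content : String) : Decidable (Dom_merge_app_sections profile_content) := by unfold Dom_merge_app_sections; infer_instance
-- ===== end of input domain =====

-- B replaces A's in_app/current_app flag machinery by an index-driven loop that consumes
-- each app: block with an inner scan (objective: simpler decomposition, same cost).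


-- ===== PORT A =====
-- state: (result, app_sections, current_app, in_app, indent_level)
def pvA_State := List String × List String × List String × Bool × Int

-- one iteration of A's while loop (the loop only reads lines[i] and does i += 1: a fold)
def pvA_step (st : pvA_State) (line : String) : pvA_State :=
  let (result, app_sections, current_app, in_app, indent_level) := st
  if PySem.Str.strip line == "app:" &&
      (!(PySem.Str.startswith line " ") || PySem.Str.slice line none (some 4) == "app:") then
    let app_sections :=
      if in_app && !current_app.isEmpty then
        app_sections ++ [PySem.Str.join "\n" (current_app.drop 1)]
      else app_sections
    (result, app_sections, [line], true,
      PySem.Str.len line - PySem.Str.len (PySem.Str.lstrip line))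
  else if in_app then
    if !(PySem.Str.strip line == "") &&
        -- Python ' ' * (indent_level + 1): indent_level ≥ 0 here, rendered via replicate
        !(PySem.Str.startswith line (String.ofList (List.replicate (indent_level + 1).toNat ' '))) &&
        !(PySem.Str.strip line == "") then
      let app_sections :=
        if !current_app.isEmpty then
          app_sections ++ [PySem.Str.join "\n" (current_app.drop 1)]
        else app_sections
      (result ++ [line], app_sections, [], false, indent_level)
    else
      (result, app_sections, current_app ++ [line], in_app, indent_level)
  else
    (result ++ [line], app_sections, current_app, in_app, indent_level)

def merge_app_sections (profile_content : String) : String :=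
  -- separator "\n" is nonempty, so split? never returns none; getD [] is unreachable
  let lines := (PySem.Str.split? profile_content "\n").getD []
  let st := lines.foldl pvA_step ([], [], [], false, 0)
  let (result, app_sections, current_app, in_app, _) := st
  let app_sections :=
    if in_app && !current_app.isEmpty then
      app_sections ++ [PySem.Str.join "\n" (current_app.drop 1)]
    else app_sections
  let result :=
    if !app_sections.isEmpty then
      result ++ ["app:" ++ "\n" ++ PySem.Str.join "\n" app_sections]
    else result
  PySem.Str.join "\n" result

-- ===== PORT B =====
def pvB_isHeader (line : String) : Bool :=
  PySem.Str.strip line == "app:" && !(PySem.Str.startswith line " ")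

-- the inner while loop's "keep consuming" test
def pvB_cont (body : String) (line : String) : Bool :=
  !pvB_isHeader line && (PySem.Str.strip line == "" || PySem.Str.startswith line body)

-- B's index loop: on a header, the inner loop consumes the block (takeWhile/dropWhile
-- is the j-scan of Source B); otherwise the line goes to result
def pvB_go (lines : List String) : List String × List String :=
  match lines with
  | [] => ([], [])
  | line :: rest =>
    if pvB_isHeader line then
      let indent := PySem.Str.len line - PySem.Str.len (PySem.Str.lstrip line)
      -- Python ' ' * (indent + 1): indent ≥ 0 here, rendered via replicate
      let body := String.ofList (List.replicate (indent + 1).toNat ' ')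
      let block := rest.takeWhile (pvB_cont body)
      let r := pvB_go (rest.dropWhile (pvB_cont body))
      (r.1, PySem.Str.join "\n" block :: r.2)
    else
      let r := pvB_go rest
      (line :: r.1, r.2)
termination_by lines.length
decreasing_by
  · simp
    exact List.length_dropWhile_le _ _
  · simp

def merge_app_sections_alt (profile_content : String) : String :=
  -- separator "\n" is nonempty, so split? never returns none; getD [] is unreachable
  let lines := (PySem.Str.split? profile_content "\n").getD []
  let (result, app_sections) := pvB_go lines
  let result :=
    if !app_sections.isEmpty then
      result ++ ["app:" ++ "\n" ++ PySem.Str.join "\n" app_sections]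
    else result
  PySem.Str.join "\n" result

-- ===== PRECONDITION & SPEC =====
def Spec_merge_app_sections (profile_content : String) (out : String) : Prop := out = merge_app_sections_alt profile_content
instance (profile_content : String) (out : String) : Decidable (Spec_merge_app_sections profile_content out) := by unfold Spec_merge_app_sections; infer_instance

-- ===== CLAIM (what is proved, stated in full; the proofs are below) =====
def Claim_equal_merge_app_sections : Prop := ∀ (profile_content : String), Dom_merge_app_sections profile_content → Spec_merge_app_sections profile_content (merge_app_sections profile_content)

-- ===== LEMMAS AND PROOFS =====

-- the flush A performs after the loop (also used to state the loop invariant)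
def pvFin (st : pvA_State) : List String × List String :=
  match st with
  | (result, app_sections, current_app, in_app, _) =>
    (result,
     if in_app && !current_app.isEmpty then
       app_sections ++ [PySem.Str.join "\n" (current_app.drop 1)]
     else app_sections)

def pvBody (d : Int) : String := String.ofList (List.replicate (d + 1).toNat ' ')

-- A's root-level-app test coincides with B's: when the line starts with ' ',
-- its first four characters cannot be "app:".
lemma pvA_header_eq (line : String) :
    (PySem.Str.strip line == "app:" &&
      (!(PySem.Str.startswith line " ") || PySem.Str.slice line none (some 4) == "app:"))
      = pvB_isHeader line := by
  unfold pvB_isHeader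
  cases hs : (PySem.Str.strip line == "app:") with
  | false => simp
  | true =>
    simp only [Bool.true_and]
    cases hw : PySem.Str.startswith line " " with
    | false => simp
    | true =>
      simp only [Bool.not_true, Bool.false_or]
      apply beq_eq_false_iff_ne.mpr
      intro he
      have hp : " ".toList <+: line.toList := by
        have := hw
        simp only [PySem.Str.startswith_eq] at this
        exact (PySem.Chars.startswith_iff _ _).mp this
      obtain ⟨t, ht⟩ := hp
      have h4 : (PySem.Str.slice line none (some 4)).toList = List.take 4 line.toList := by
        simp only [PySem.Str.toList_slice, PySem.Chars.slice_eq_listSlice,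
          PySem.List.slice_to line.toList (by norm_num : (0:Int) ≤ 4)]
        rfl
      rw [he] at h4
      rw [← ht] at h4
      simp at h4

-- inside a section A's leave test is the negation of B's continue test
lemma pvA_term_eq (line : String) (d : Int) (h : pvB_isHeader line = false) :
    (!(PySem.Str.strip line == "") &&
      !(PySem.Str.startswith line (pvBody d)) &&
      !(PySem.Str.strip line == "")) = !(pvB_cont (pvBody d) line) := by
  unfold pvB_cont
  rw [h]
  cases PySem.Str.strip line == "" <;> cases PySem.Str.startswith line (pvBody d) <;> simp

-- how one A-step acts in each of the five situations
lemma pvStep_out_header (result secs : List String) (d : Int) (line : String)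
    (hH : pvB_isHeader line = true) :
    pvA_step (result, secs, ([] : List String), false, d) line =
      (result, secs, [line], true,
       PySem.Str.len line - PySem.Str.len (PySem.Str.lstrip line)) := by
  unfold pvA_step
  rw [pvA_header_eq]
  simp [hH]

lemma pvStep_out_other (result secs : List String) (d : Int) (line : String)
    (hH : pvB_isHeader line = false) :
    pvA_step (result, secs, ([] : List String), false, d) line =
      (result ++ [line], secs, [], false, d) := by
  unfold pvA_step
  rw [pvA_header_eq]
  simp [hH]

lemma pvStep_in_header (result secs : List String) (h : String) (blk : List String)
    (d : Int) (line : String) (hH : pvB_isHeader line = true) :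
    pvA_step (result, secs, h :: blk, true, d) line =
      (result, secs ++ [PySem.Str.join "\n" blk], [line], true,
       PySem.Str.len line - PySem.Str.len (PySem.Str.lstrip line)) := by
  unfold pvA_step
  rw [pvA_header_eq]
  simp [hH]

lemma pvStep_in_cont (result secs : List String) (h : String) (blk : List String)
    (d : Int) (line : String) (hH : pvB_isHeader line = false)
    (hc : pvB_cont (pvBody d) line = true) :
    pvA_step (result, secs, h :: blk, true, d) line =
      (result, secs, h :: (blk ++ [line]), true, d) := by
  unfold pvA_step
  rw [pvA_header_eq]
  have ht := pvA_term_eq line d hH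
  rw [hc] at ht
  simp only [pvBody] at ht
  simp at ht
  simp [hH]
  intro h1 h2 h3
  exact absurd (ht h1 h2) h1

lemma pvStep_in_term (result secs : List String) (h : String) (blk : List String)
    (d : Int) (line : String) (hH : pvB_isHeader line = false)
    (hc : pvB_cont (pvBody d) line = false) :
    pvA_step (result, secs, h :: blk, true, d) line =
      (result ++ [line], secs ++ [PySem.Str.join "\n" blk], [], false, d) := by
  unfold pvA_step
  rw [pvA_header_eq]
  have ht := pvA_term_eq line d hH
  rw [hc] at ht
  simp only [pvBody] at ht
  simp at ht
  simp [hH, ht.1.1, ht.1.2]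

-- unfolding lemmas for B's recursion
lemma pvGo_nil : pvB_go [] = ([], []) := by rw [pvB_go]

lemma pvGo_header (line : String) (rest : List String) (hH : pvB_isHeader line = true) :
    pvB_go (line :: rest) =
      ((pvB_go (rest.dropWhile (pvB_cont (pvBody
          (PySem.Str.len line - PySem.Str.len (PySem.Str.lstrip line)))))).1,
       PySem.Str.join "\n" (rest.takeWhile (pvB_cont (pvBody
          (PySem.Str.len line - PySem.Str.len (PySem.Str.lstrip line)))))
         :: (pvB_go (rest.dropWhile (pvB_cont (pvBody
          (PySem.Str.len line - PySem.Str.len (PySem.Str.lstrip line)))))).2) := by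
  rw [pvB_go, if_pos hH]
  rfl

lemma pvGo_other (line : String) (rest : List String) (hH : pvB_isHeader line = false) :
    pvB_go (line :: rest) = (line :: (pvB_go rest).1, (pvB_go rest).2) := by
  rw [pvB_go, if_neg (by simp [hH])]

-- the joint loop invariant: A's fold in out-mode / in-mode vs B's block recursion
lemma pvMain : ∀ n : Nat,
    (∀ (lines result secs : List String) (d : Int), lines.length ≤ n →
      pvFin (lines.foldl pvA_step (result, secs, ([] : List String), false, d)) =
        (result ++ (pvB_go lines).1, secs ++ (pvB_go lines).2)) ∧
    (∀ (rest result secs : List String) (h : String) (blk : List String) (d : Int),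
        rest.length ≤ n →
      pvFin (rest.foldl pvA_step (result, secs, h :: blk, true, d)) =
        (result ++ (pvB_go (rest.dropWhile (pvB_cont (pvBody d)))).1,
         secs ++ [PySem.Str.join "\n" (blk ++ rest.takeWhile (pvB_cont (pvBody d)))]
              ++ (pvB_go (rest.dropWhile (pvB_cont (pvBody d)))).2)) := by
  intro n
  induction n with
  | zero =>
    constructor
    · intro lines result secs d hlen
      have hnil : lines = [] := List.eq_nil_of_length_eq_zero (Nat.le_zero.mp hlen)
      subst hnil
      simp [pvGo_nil, pvFin]
    · intro rest result secs h blk d hlen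
      have hnil : rest = [] := List.eq_nil_of_length_eq_zero (Nat.le_zero.mp hlen)
      subst hnil
      simp [pvGo_nil, pvFin]
  | succ n ih =>
    constructor
    · intro lines result secs d hlen
      cases lines with
      | nil => simp [pvGo_nil, pvFin]
      | cons line rest =>
        have hr : rest.length ≤ n := by simp at hlen; omega
        simp only [List.foldl_cons]
        cases hH : pvB_isHeader line with
        | true =>
          rw [pvStep_out_header _ _ _ _ hH]
          rw [ih.2 rest result secs line []
            (PySem.Str.len line - PySem.Str.len (PySem.Str.lstrip line)) hr]
          rw [pvGo_header line rest hH]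
          simp
        | false =>
          rw [pvStep_out_other _ _ _ _ hH]
          rw [ih.1 rest (result ++ [line]) secs d hr]
          rw [pvGo_other line rest hH]
          simp
    · intro rest result secs h blk d hlen
      cases rest with
      | nil => simp [pvGo_nil, pvFin]
      | cons line rest2 =>
        have hr : rest2.length ≤ n := by simp at hlen; omega
        simp only [List.foldl_cons]
        cases hH : pvB_isHeader line with
        | true =>
          have hcf : pvB_cont (pvBody d) line = false := by simp [pvB_cont, hH]
          rw [pvStep_in_header _ _ _ _ _ _ hH]
          rw [ih.2 rest2 result (secs ++ [PySem.Str.join "\n" blk]) line []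
            (PySem.Str.len line - PySem.Str.len (PySem.Str.lstrip line)) hr]
          rw [List.takeWhile_cons_of_neg (by simp [hcf]), List.dropWhile_cons_of_neg (by simp [hcf])]
          rw [pvGo_header line rest2 hH]
          simp
        | false =>
          cases hc : pvB_cont (pvBody d) line with
          | true =>
            rw [pvStep_in_cont _ _ _ _ _ _ hH hc]
            rw [ih.2 rest2 result secs h (blk ++ [line]) d hr]
            rw [List.takeWhile_cons_of_pos (by simp [hc]), List.dropWhile_cons_of_pos (by simp [hc])]
            simp
          | false =>
            rw [pvStep_in_term _ _ _ _ _ _ hH hc]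
            rw [ih.1 rest2 (result ++ [line]) (secs ++ [PySem.Str.join "\n" blk]) d hr]
            rw [List.takeWhile_cons_of_neg (by simp [hc]), List.dropWhile_cons_of_neg (by simp [hc])]
            rw [pvGo_other line rest2 hH]
            simp

-- ===== VERDICT =====
theorem merge_app_sections_spec : Claim_equal_merge_app_sections := by
  intro p _
  unfold Spec_merge_app_sections merge_app_sections merge_app_sections_alt
  have h := ((pvMain ((PySem.Str.split? p "\n").getD []).length).1
      ((PySem.Str.split? p "\n").getD []) [] [] 0 (le_refl _))
  rcases hst : ((PySem.Str.split? p "\n").getD []).foldl pvA_step ([], [], [], false, 0) with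
    ⟨r, s, c, b, dd⟩
  rcases hgo : pvB_go ((PySem.Str.split? p "\n").getD []) with ⟨gr, gs⟩
  rw [hst, hgo] at h
  simp only [pvFin, List.nil_append] at h
  obtain ⟨h1, h2⟩ := Prod.mk.injEq .. ▸ h
  subst h1
  simp only [hst, hgo, h2]
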